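-- pv_equiv track=rewrite | github.com/qldrh112/qldrh112 | ssafy/algorithm/20240206/day3_palindrome.py | x_word_palindrome
-- ===== SOURCE A (Python) =====
-- def x_word_palindrome(x, arr):
--     """
--     param x: 찾아야 하는 회문의 길이
--     param arr: 2차원 문자열 리스트
--     return: x글자 회문의 수
--     """
--     count = 0
--     # row 검증
--     for col in range(8):
--         for row in range(8-x+1):
--             if arr[col][row:row+x] == arr[col][row:row+x][::-1]:
--                 count += 1
--
--     # col 검증
--     for row in range(8):
--         for col in range(8-x+1):
--             # 세로 카운트 위치 주의
--             col_count = 0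
--             for i in range(x//2):
--                 if arr[col+i][row] == arr[col+x-i-1][row]:
--                     col_count += 1
--                 else:
--                     break           # for i in range(x//2)
--             if col_count == x//2:
--                 count += 1
--
--     return count
-- ===== SOURCE B (Python) =====
-- def x_word_palindrome(x, arr):
--     """Transpose-first re-implementation: a window longer than the board fits
--     nowhere, otherwise take the 8 rows, build the 8 column strings once, and
--     count palindromic x-slices with one uniform helper on rows and columns."""
--     if x > 8:
--         return 0
--     rows = [arr[r] for r in range(8)]
--     cols = [''.join(row[c] for row in rows) for c in range(8)]
--
--     def pals(s):
--         return sum(1 for j in range(8 - x + 1) if s[j:j+x] == s[j:j+x][::-1])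
--
--     return sum(pals(row) for row in rows) + sum(pals(col) for col in cols)
-- ===== Notes on version B (the rewrite author's own statement) =====
-- stated objective: simpler
-- what changed: B returns 0 outright when the window is longer than the board, otherwise transposes the 8x8 grid into column strings once and counts palindromes with a single uniform slice==reversed-slice scan applied to rows and columns, replacing A's asymmetric row-slice pass and pairwise break-loop column pass.
-- outside the precondition, e.g. on x_word_palindrome(1, ['abc', 'abc', 'abc', 'abc', 'abc', 'abc', 'abc', 'abc']): A returns 128, B raises IndexError
import Mathlib
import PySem

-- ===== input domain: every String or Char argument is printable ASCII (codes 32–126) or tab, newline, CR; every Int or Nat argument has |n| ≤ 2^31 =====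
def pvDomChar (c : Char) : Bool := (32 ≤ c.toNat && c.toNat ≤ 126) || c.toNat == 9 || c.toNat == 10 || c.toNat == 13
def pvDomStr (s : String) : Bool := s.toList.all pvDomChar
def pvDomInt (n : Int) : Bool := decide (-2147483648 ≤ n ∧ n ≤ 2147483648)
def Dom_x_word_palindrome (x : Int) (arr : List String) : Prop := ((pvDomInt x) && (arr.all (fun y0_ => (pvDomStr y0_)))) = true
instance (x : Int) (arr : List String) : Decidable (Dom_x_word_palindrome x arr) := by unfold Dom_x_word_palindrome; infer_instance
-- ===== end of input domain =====

-- B replaces A's asymmetric row-slice pass + pairwise break-loop column pass by one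
-- transpose step and one uniform palindromic-slice scan (objective: simpler; not faster).

-- ===== PORT A =====
-- arr[r][c] as a char option; 'none' is where Python raises IndexError (outside Pre_).
def pvGetC (arr : List String) (r c : Int) : Option Char :=
  (PySem.List.pyGet? arr r).bind (fun s => PySem.List.pyGet? s.toList c)

-- A's inner 'for i in range(x//2): if … : col_count += 1 else: break' with its running count.
def pvBreakLoop (p : Int → Bool) : List Int → Int → Int
  | [], acc => acc
  | i :: rest, acc => if p i then pvBreakLoop p rest (acc + 1) else acc

-- literal port of A; arr[col] is pyGetD (exact under Pre_, which gives col < len(arr));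
-- s[::-1] is List.reverse (PySem.List.slice?_none_none_neg_one).
def x_word_palindrome (x : Int) (arr : List String) : Int :=
  let count1 := (PySem.List.pyRange 0 8 1).foldl (fun count col =>
    (PySem.List.pyRange 0 (8 - x + 1) 1).foldl (fun count row =>
      let s := PySem.List.slice (PySem.List.pyGetD arr col "").toList (some row) (some (row + x))
      if s = s.reverse then count + 1 else count) count) 0
  (PySem.List.pyRange 0 8 1).foldl (fun count row =>
    (PySem.List.pyRange 0 (8 - x + 1) 1).foldl (fun count col =>
      let colCount := pvBreakLoop
        (fun i => decide (pvGetC arr (col + i) row = pvGetC arr (col + x - i - 1) row))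
        (PySem.List.pyRange 0 (PySem.Int.floordiv x 2) 1) 0
      if colCount = PySem.Int.floordiv x 2 then count + 1 else count) count) count1

-- ===== PORT B =====
-- literal port of B (Source B); arr[r] / row[c] are pyGetD (exact under Pre_, where they are in
-- range; Python raises IndexError outside it).
def x_word_palindrome_alt (x : Int) (arr : List String) : Int :=
  if 8 < x then 0
  else
    let rows := (PySem.List.pyRange 0 8 1).map (fun r => PySem.List.pyGetD arr r "")
    let cols := (PySem.List.pyRange 0 8 1).map (fun c =>
      rows.map (fun row => PySem.List.pyGetD row.toList c ' '))
    let pals := fun (s : List Char) =>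
      ((PySem.List.pyRange 0 (8 - x + 1) 1).map (fun j =>
        let t := PySem.List.slice s (some j) (some (j + x))
        if t = t.reverse then (1 : Int) else 0)).sum
    (rows.map (fun r => pals r.toList)).sum + (cols.map pals).sum

-- ===== PRECONDITION & SPEC =====
-- Pre_ restricts to the task's natural domain: a nonnegative palindrome length and, when the
-- window fits (x ≤ 8), a full 8×8-or-wider character grid. Outside it A variously raises
-- IndexError, or returns accidental values: for x < 0 its two passes disagree by accident
-- (the column pass never counts while the row pass counts negative-length clamped slices),
-- and on grids with rows shorter than 8 a value returned under an early mismatch-break or an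
-- x < 2 window is an accident of the cells the loops happen to skip.
def Pre_x_word_palindrome (x : Int) (arr : List String) : Prop :=
  0 ≤ x ∧ (x ≤ 8 → 8 ≤ arr.length ∧ ∀ s ∈ arr.take 8, 8 ≤ s.toList.length)
instance (x : Int) (arr : List String) : Decidable (Pre_x_word_palindrome x arr) := by
  unfold Pre_x_word_palindrome; infer_instance
def pvWitness_x_word_palindrome : Int × List String :=
  (2, ["abccbaab", "bbaaccbb", "abcdefgh", "hgfedcba", "aabbaabb", "zzzzzzzz", "abababab", "qwerqwer"])
def Spec_x_word_palindrome (x : Int) (arr : List String) (out : Int) : Prop := out = x_word_palindrome_alt x arr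
instance (x : Int) (arr : List String) (out : Int) : Decidable (Spec_x_word_palindrome x arr out) := by unfold Spec_x_word_palindrome; infer_instance

-- ===== CLAIM (what is proved, stated in full; the proofs are below) =====
def Claim_equal_x_word_palindrome : Prop := ∀ (x : Int) (arr : List String), Dom_x_word_palindrome x arr → Pre_x_word_palindrome x arr → Spec_x_word_palindrome x arr (x_word_palindrome x arr)

-- ===== LEMMAS AND PROOFS =====


lemma pv_foldl_ite_count (p : Int → Prop) [DecidablePred p] (l : List Int) (init : Int) :
    l.foldl (fun a j => if p j then a + 1 else a) init
      = init + (l.map (fun j => if p j then (1 : Int) else 0)).sum := by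
  induction l generalizing init with
  | nil => simp
  | cons i rest ih => simp only [List.foldl_cons, List.map_cons, List.sum_cons, ih]; split <;> ring


lemma pv_floordiv_two (x : Int) (hx : 0 ≤ x) :
    PySem.Int.floordiv x 2 = ((x.toNat / 2 : Nat) : Int) := by
  rw [PySem.Int.floordiv_eq_iff_of_pos (by norm_num)]
  omega

lemma pv_short_palin (l : List Char) (h : l.length ≤ 1) : l = l.reverse := by
  rcases l with _ | ⟨a, _ | ⟨b, m⟩⟩ <;> simp at h ⊢

-- a column position always counts when 0 ≤ x ≤ 1, in A (empty pair loop) and in B (slice of length ≤ 1)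
lemma pv_smallterm (p : Int → Bool) (x j : Int) (t : List Char) (hx0 : 0 ≤ x) (hx1 : x ≤ 1)
    (hj0 : 0 ≤ j) :
    (if pvBreakLoop p (PySem.List.pyRange 0 (PySem.Int.floordiv x 2) 1) 0 = PySem.Int.floordiv x 2
      then (1 : Int) else 0)
    = (if PySem.List.slice t (some j) (some (j + x)) = (PySem.List.slice t (some j) (some (j + x))).reverse
      then (1 : Int) else 0) := by
  have h2 : PySem.Int.floordiv x 2 = 0 := by rw [pv_floordiv_two x hx0]; omega
  have hp : PySem.List.slice t (some j) (some (j + x)) =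
      (PySem.List.slice t (some j) (some (j + x))).reverse := by
    apply pv_short_palin
    rw [PySem.List.slice_toNat t hj0 (by omega)]
    simp [List.length_take]
    omega
  rw [h2, show PySem.List.pyRange 0 0 1 = [] from rfl]
  simp only [pvBreakLoop]
  rw [if_pos hp]
  simp

lemma pv_breakLoop_eq_iff (p : Int → Bool) (l : List Int) (acc : Int) :
    pvBreakLoop p l acc = acc + l.length ↔ ∀ i ∈ l, p i := by
  induction l generalizing acc with
  | nil => simp [pvBreakLoop]
  | cons i rest ih =>
    simp only [pvBreakLoop, List.length_cons, List.mem_cons]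
    by_cases hp : p i
    · simp only [hp, if_true]
      rw [show (acc + (↑(rest.length + 1)) : Int) = (acc + 1) + rest.length by push_cast; ring,
        ih]
      simp [hp]
    · simp only [hp]
      constructor
      · intro h; exact absurd h (by push_cast; omega)
      · intro h; exact absurd (h i (Or.inl rfl)) (by simp [hp])

lemma pv_palin_iff (t : List Char) :
    t = t.reverse ↔ ∀ i, (hi : i < t.length / 2) → t[i]'(by omega) = t[t.length - 1 - i]'(by omega) := by
  constructor
  · intro h i hi
    have h1 : i < t.length := by omega
    have := congrArg (fun l : List Char => l[i]?) h
    simp only [List.getElem?_reverse h1] at this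
    rw [List.getElem?_eq_getElem h1, List.getElem?_eq_getElem (by omega)] at this
    exact Option.some_injective _ this
  · intro h
    apply List.ext_getElem (by simp)
    intro i h1 h2
    rw [List.getElem_reverse]
    by_cases hi : i < t.length / 2
    · exact h i hi
    · by_cases hj : t.length - 1 - i < t.length / 2
      · have := (h _ hj).symm
        simpa [show t.length - 1 - (t.length - 1 - i) = i by omega] using this
      · simp [show t.length - 1 - i = i by omega]


lemma pv_colterm (x : Int) (arr : List String) (hx : 0 ≤ x) (h8 : 8 ≤ arr.length)
    (hlen : ∀ s ∈ arr.take 8, 8 ≤ s.toList.length) (c j : Int)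
    (hc0 : 0 ≤ c) (hc8 : c < 8) (hj0 : 0 ≤ j) (hj : j < 8 - x + 1) :
    (if pvBreakLoop
        (fun i => decide (pvGetC arr (j + i) c = pvGetC arr (j + x - i - 1) c))
        (PySem.List.pyRange 0 (PySem.Int.floordiv x 2) 1) 0 = PySem.Int.floordiv x 2
      then (1 : Int) else 0)
    = (if PySem.List.slice
          ((PySem.List.pyRange 0 8 1).map (fun r =>
            PySem.List.pyGetD (PySem.List.pyGetD arr r "").toList c ' ')) (some j) (some (j + x))
        = (PySem.List.slice
          ((PySem.List.pyRange 0 8 1).map (fun r =>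
            PySem.List.pyGetD (PySem.List.pyGetD arr r "").toList c ' ')) (some j) (some (j + x))).reverse
      then (1 : Int) else 0) := by
  have hx8 : x ≤ 8 := by omega
  set f : Int → Char := fun r => PySem.List.pyGetD (PySem.List.pyGetD arr r "").toList c ' ' with hf
  set tc : List Char := (PySem.List.pyRange 0 8 1).map f with htc
  have htclen : tc.length = 8 := by
    rw [htc, List.length_map, PySem.List.length_pyRange_one 0 8]; decide
  have htcget : ∀ k : Nat, (hk : k < 8) → tc[k]'(by omega) = f k := by
    intro k hk
    have h := PySem.List.getElem?_map_pyRange_zero f 8 k hk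
    simp only [Nat.cast_ofNat, ← htc] at h
    rw [List.getElem?_eq_getElem (by omega)] at h
    exact Option.some_injective _ h
  set u := PySem.List.slice tc (some j) (some (j + x)) with hu
  have hu' : u = (tc.drop j.toNat).take x.toNat := by
    rw [hu, PySem.List.slice_toNat tc hj0 (by omega), show (j + x).toNat - j.toNat = x.toNat by omega]
  have hulen : u.length = x.toNat := by
    rw [hu']; simp [htclen]; omega
  have hugetq : ∀ i : Nat, i < x.toNat → u[i]? = some (f (j + i)) := by
    intro i h
    rw [hu', List.getElem?_take_of_lt h, List.getElem?_drop,
      List.getElem?_eq_getElem (by omega : j.toNat + i < tc.length),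
      htcget (j.toNat + i) (by omega)]
    congr 2
    omega
  have hidx : ∀ (a b : Nat) (ha : a < u.length) (hb : b < u.length), a = b → u[a]'ha = u[b]'hb := by
    intro a b ha hb h; subst h; rfl
  have hget : ∀ r : Int, 0 ≤ r → r < 8 → pvGetC arr r c = some (f r) := by
    intro r hr0 hr8
    have hr : r.toNat < arr.length := by omega
    have hmem : arr[r.toNat] ∈ arr.take 8 := by
      have ht : (arr.take 8)[r.toNat]'(by simp; omega) = arr[r.toNat] := List.getElem_take
      exact ht ▸ List.getElem_mem _
    have hslen : 8 ≤ (arr[r.toNat]).toList.length := hlen _ hmem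
    have e1 : PySem.List.pyGet? arr r = some arr[r.toNat] := by
      rw [PySem.List.pyGet?_of_nonneg arr hr0, List.getElem?_eq_getElem hr]
    have e2 : PySem.List.pyGetD arr r "" = arr[r.toNat] :=
      PySem.List.pyGetD_eq_getElem arr "" hr0 (by omega)
    have e3 : PySem.List.pyGet? (arr[r.toNat]).toList c = some ((arr[r.toNat]).toList[c.toNat]'(by omega)) := by
      rw [PySem.List.pyGet?_of_nonneg _ hc0, List.getElem?_eq_getElem (by omega)]
    rw [pvGetC, e1, Option.bind_some, e3, hf]
    simp only [e2]
    rw [PySem.List.pyGetD_eq_getElem _ ' ' hc0 (by omega)]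
  rw [pv_floordiv_two x hx]
  have hmatch : ∀ i : Nat, i < x.toNat / 2 →
      ((pvGetC arr (j + i) c = pvGetC arr (j + x - i - 1) c) ↔
        (u[i]? = u[x.toNat - 1 - i]?)) := by
    intro i hi
    have hn2 : 2 ≤ x.toNat := by omega
    rw [hget (j + i) (by omega) (by omega), hget (j + x - i - 1) (by omega) (by omega),
      hugetq i (by omega), hugetq (x.toNat - 1 - i) (by omega), Option.some_inj, Option.some_inj]
    constructor
    · intro h
      rw [show (j + ((x.toNat - 1 - i : Nat) : Int)) = j + x - i - 1 by omega]
      exact h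
    · intro h
      rw [show (j + ((x.toNat - 1 - i : Nat) : Int)) = j + x - i - 1 by omega] at h
      exact h
  have hA : (pvBreakLoop
        (fun i => decide (pvGetC arr (j + i) c = pvGetC arr (j + x - i - 1) c))
        (PySem.List.pyRange 0 ((x.toNat / 2 : Nat) : Int) 1) 0 = ((x.toNat / 2 : Nat) : Int)) ↔
      (∀ i : Nat, i < x.toNat / 2 → u[i]? = u[x.toNat - 1 - i]?) := by
    have hl : ((x.toNat / 2 : Nat) : Int) =
        0 + ((PySem.List.pyRange 0 ((x.toNat / 2 : Nat) : Int) 1).length : Int) := by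
      rw [PySem.List.length_pyRange_one]; push_cast; omega
    nth_rewrite 2 [hl]
    rw [pv_breakLoop_eq_iff]
    constructor
    · intro h i hi
      have hm := h (i : Int) (by
        rw [PySem.List.mem_pyRange_one]
        exact ⟨by positivity, by push_cast; omega⟩)
      rw [decide_eq_true_iff] at hm
      exact (hmatch i hi).mp hm
    · intro h i hi
      rw [PySem.List.mem_pyRange_one] at hi
      rw [decide_eq_true_iff]
      have hi' : i.toNat < x.toNat / 2 := by omega
      have hm := (hmatch i.toNat hi').mpr (h i.toNat hi')
      rwa [show ((i.toNat : Nat) : Int) = i by omega] at hm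
  have hB : (u = u.reverse) ↔
      (∀ i : Nat, i < x.toNat / 2 → u[i]? = u[x.toNat - 1 - i]?) := by
    rw [pv_palin_iff]
    constructor
    · intro h i hi
      rw [List.getElem?_eq_getElem (by omega : i < u.length),
        List.getElem?_eq_getElem (by omega : x.toNat - 1 - i < u.length), Option.some_inj]
      rw [hidx (x.toNat - 1 - i) (u.length - 1 - i) (by omega) (by omega) (by omega)]
      exact h i (by omega)
    · intro h i hi
      have hm := h i (by omega)
      rw [List.getElem?_eq_getElem (by omega : i < u.length),
        List.getElem?_eq_getElem (by omega : x.toNat - 1 - i < u.length), Option.some_inj] at hm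
      rw [← hidx (x.toNat - 1 - i) (u.length - 1 - i) (by omega) (by omega) (by omega)]
      exact hm
  rw [if_congr (hA.trans hB.symm) rfl rfl]


-- ===== VERDICT (by name: the statement is the Claim_ definition above) =====
theorem x_word_palindrome_spec : Claim_equal_x_word_palindrome := by
  intro x arr _ hpre
  obtain ⟨hx, hfit⟩ := hpre
  unfold Spec_x_word_palindrome
  by_cases hbig : 8 < x
  · -- window longer than the board: A's scan ranges are empty, B returns 0 outright
    have hnil : PySem.List.pyRange 0 (8 - x + 1) 1 = [] :=
      List.eq_nil_of_length_eq_zero (by rw [PySem.List.length_pyRange_one]; omega)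
    rw [x_word_palindrome_alt, if_pos hbig]
    simp [x_word_palindrome, hnil, List.foldl_fixed]
  · obtain ⟨h8, hlen⟩ := hfit (by omega)
    rw [x_word_palindrome_alt, if_neg hbig]
    simp only [x_word_palindrome]
    simp only [pv_foldl_ite_count, PySem.List.foldl_add, zero_add,
      List.map_map, Function.comp_def]
    congr 1
    refine congrArg List.sum (List.map_congr_left ?_)
    intro c hc
    rw [PySem.List.mem_pyRange_one] at hc
    refine congrArg List.sum (List.map_congr_left ?_)
    intro j hj
    rw [PySem.List.mem_pyRange_one] at hj
    by_cases hx2 : 2 ≤ x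
    · simpa using pv_colterm x arr hx h8 hlen c j hc.1 hc.2 hj.1 hj.2
    · exact pv_smallterm _ x j _ hx (by omega) hj.1
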